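-- pv_equiv track=rewrite | github.com/brandoninkel/OSRS_AI_System | api/wiki_template_parser.py | parse_template_params
-- ===== SOURCE A (Python) =====
-- from typing import Dict, List, Optional, Tuple
--
-- def parse_template_params(params_text: str) -> Dict[str, str]:
--     """Parse template parameters from text"""
--     params = {}
--     if not params_text:
--         return params
--
--     # Split by | but handle nested templates
--     parts = []
--     current_part = ""
--     brace_count = 0
--
--     for char in params_text:
--         if char == '{':
--             brace_count += 1
--         elif char == '}':
--             brace_count -= 1
--         elif char == '|' and brace_count == 0:
--             parts.append(current_part)
--             current_part = ""
--             continue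
--         current_part += char
--
--     if current_part:
--         parts.append(current_part)
--
--     # Parse each parameter
--     positional_index = 1
--     for part in parts:
--         if '=' in part:
--             key, value = part.split('=', 1)
--             params[key.strip()] = value.strip()
--         else:
--             # Positional parameter
--             params[str(positional_index)] = part.strip()
--             positional_index += 1
--
--     return params
-- ===== SOURCE B (Python) =====
-- def parse_template_params(params_text: str):
--     """Parse template parameters: split naively on '|', then re-join pieces whose
--     accumulated buffer is brace-unbalanced, committing each balanced buffer directly
--     into the params dict (fused classification, no intermediate parts list)."""
--     params = {}
--     positional_index = 1
--
--     def commit(part):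
--         nonlocal positional_index
--         if '=' in part:
--             key, value = part.split('=', 1)
--             params[key.strip()] = value.strip()
--         else:
--             params[str(positional_index)] = part.strip()
--             positional_index += 1
--
--     pieces = params_text.split('|')
--     buffer = pieces[0]
--     for piece in pieces[1:]:
--         if buffer.count('{') == buffer.count('}'):
--             commit(buffer)
--             buffer = piece
--         else:
--             buffer += '|' + piece
--     if buffer:
--         commit(buffer)
--     return params
-- ===== Notes on version B (the rewrite author's own statement) =====
-- stated objective: faster
-- what changed: Replaces A's two-pass per-character scan (depth-tracking state machine building a parts list, then a classify loop) by split-then-merge: split the text naively on the pipe character with str.split, re-join pieces while the accumulated buffer is brace-unbalanced, and commit each balanced buffer directly into the params dict with the positional index.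
import Mathlib
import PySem

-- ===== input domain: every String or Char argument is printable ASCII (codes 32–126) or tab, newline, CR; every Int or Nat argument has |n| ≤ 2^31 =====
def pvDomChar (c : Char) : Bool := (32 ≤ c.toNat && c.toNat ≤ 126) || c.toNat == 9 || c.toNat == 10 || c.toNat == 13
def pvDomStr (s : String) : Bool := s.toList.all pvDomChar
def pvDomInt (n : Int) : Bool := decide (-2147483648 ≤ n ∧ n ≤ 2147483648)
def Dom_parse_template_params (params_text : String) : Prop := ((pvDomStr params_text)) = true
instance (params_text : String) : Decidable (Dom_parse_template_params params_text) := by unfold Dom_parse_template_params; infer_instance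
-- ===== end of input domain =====

-- B replaces A's two-pass depth-tracking character scan by split-on-'|' + re-joining
-- brace-unbalanced buffers, committing each balanced buffer straight into the dict
-- (objective: faster — a timing run measured B faster than A on its large inputs).

-- ===== PORT A =====
-- the body of both Pythons' parameter-classification step ('=' split vs positional):
-- A runs it in its second loop over parts, B in its commit() helper.
def pvCommit (st : PySem.Dict String String × Int) (part : List Char) :
    PySem.Dict String String × Int :=
  if PySem.Chars.isIn ['='] part then
    match PySem.Chars.splitOnMax part ['='] 1 with
    | [k, v] =>
      (st.1.insert (String.ofList (PySem.Chars.strip k)) (String.ofList (PySem.Chars.strip v)), st.2)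
    | _ => st  -- unreachable: split('=',1) with '=' present yields exactly two pieces
  else
    (st.1.insert (PySem.Int.toStr st.2) (String.ofList (PySem.Chars.strip part)), st.2 + 1)

-- A's per-character step: state = (parts, current_part, brace_count)
def pvAStep (st : List (List Char) × List Char × Int) (c : Char) :
    List (List Char) × List Char × Int :=
  if c = '{' then (st.1, st.2.1 ++ [c], st.2.2 + 1)
  else if c = '}' then (st.1, st.2.1 ++ [c], st.2.2 - 1)
  else if c = '|' ∧ st.2.2 = 0 then (st.1 ++ [st.2.1], [], st.2.2)
  else (st.1, st.2.1 ++ [c], st.2.2)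

def parse_template_params (params_text : String) : List (String × String) :=
  let params : PySem.Dict String String := PySem.Dict.empty
  if params_text.toList.isEmpty then params.items
  else
    let s := params_text.toList.foldl pvAStep (([] : List (List Char)), ([] : List Char), (0 : Int))
    let parts := if s.2.1 ≠ [] then s.1 ++ [s.2.1] else s.1
    (parts.foldl pvCommit (params, (1 : Int))).1.items

-- ===== PORT B =====
-- B's per-piece merge step: state = (params, positional_index, buffer)
def pvBStep (st : PySem.Dict String String × Int × List Char) (piece : List Char) :
    PySem.Dict String String × Int × List Char :=
  if PySem.Chars.count st.2.2 ['{'] = PySem.Chars.count st.2.2 ['}'] then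
    let c := pvCommit (st.1, st.2.1) st.2.2
    (c.1, c.2, piece)
  else (st.1, st.2.1, st.2.2 ++ '|' :: piece)

def parse_template_params_alt (params_text : String) : List (String × String) :=
  let pieces := PySem.Chars.splitOn params_text.toList ['|']
  -- pieces[0] as headI: str.split always returns a non-empty list, so index 0 exists
  let st := pieces.tail.foldl pvBStep
    ((PySem.Dict.empty : PySem.Dict String String), (1 : Int), pieces.headI)
  if st.2.2 ≠ [] then (pvCommit (st.1, st.2.1) st.2.2).1.items else st.1.items

-- ===== PRECONDITION & SPEC =====
def Spec_parse_template_params (params_text : String) (out : List (String × String)) : Prop :=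
  out = parse_template_params_alt params_text
instance (params_text : String) (out : List (String × String)) :
    Decidable (Spec_parse_template_params params_text out) := by
  unfold Spec_parse_template_params; infer_instance

-- ===== CLAIM (what is proved, stated in full; the proofs are below) =====
def Claim_equal_parse_template_params : Prop :=
  ∀ (params_text : String), Dom_parse_template_params params_text →
    Spec_parse_template_params params_text (parse_template_params params_text)

-- ===== LEMMAS AND PROOFS =====

-- pieces of l split at every '|'
def pvSplitPipe : List Char → List (List Char)
  | [] => [[]]
  | c :: rest =>
    if c = '|' then [] :: pvSplitPipe rest
    else
      match pvSplitPipe rest with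
      | [] => [[c]]
      | p :: ps => (c :: p) :: ps

def pvConsHead (pre : List Char) : List (List Char) → List (List Char)
  | [] => [pre]
  | p :: ps => (pre ++ p) :: ps

def pvJoinP : List (List Char) → List Char
  | [] => []
  | p :: ps => p ++ (ps.map (fun q => '|' :: q)).flatten

def pvBal (l : List Char) : Int := (l.count '{' : Int) - (l.count '}' : Int)

-- the common mid-level merge step: state = (parts accumulator, buffer)
def pvMStep (st : List (List Char) × List Char) (piece : List Char) :
    List (List Char) × List Char :=
  if st.2.count '{' = st.2.count '}' then (st.1 ++ [st.2], piece)
  else (st.1, st.2 ++ '|' :: piece)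

theorem pvSplitPipe_ne_nil (l : List Char) : pvSplitPipe l ≠ [] := by
  cases l with
  | nil => simp [pvSplitPipe]
  | cons c rest =>
    simp only [pvSplitPipe]
    split
    · simp
    · cases h : pvSplitPipe rest <;> simp

theorem pvSplitOn_go_eq (l : List Char) : ∀ (fuel : Nat) (cur : List Char) (acc : List (List Char)),
    l.length < fuel →
    PySem.Chars.splitOn.go ['|'] fuel l cur acc =
      acc.reverse ++ pvConsHead cur.reverse (pvSplitPipe l) := by
  induction l with
  | nil =>
    intro fuel cur acc h
    cases fuel with
    | zero => omega
    | succ f => simp [PySem.Chars.splitOn.go, pvSplitPipe, pvConsHead]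
  | cons c rest ih =>
    intro fuel cur acc h
    cases fuel with
    | zero => omega
    | succ f =>
      by_cases hc : c = '|'
      · have hpre : List.isPrefixOf ['|'] (c :: rest) = true := by
          simp [List.isPrefixOf, hc]
        rw [PySem.Chars.splitOn.go, if_pos hpre]
        have := ih f [] (cur.reverse :: acc) (by simp at h ⊢; omega)
        simp only [List.length_cons, List.length_nil, List.drop_succ_cons, List.drop_zero]
          at this ⊢
        rw [this]
        cases hsp : pvSplitPipe rest with
        | nil => exact absurd hsp (pvSplitPipe_ne_nil rest)
        | cons p ps => simp [pvConsHead, pvSplitPipe, hc, hsp]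
      · have hpre : List.isPrefixOf ['|'] (c :: rest) = false := by
          simp [List.isPrefixOf]; exact fun h' => absurd h'.symm hc
        rw [PySem.Chars.splitOn.go, if_neg (by simp [hpre])]
        have := ih f (c :: cur) acc (by simp at h ⊢; omega)
        rw [this]
        cases hsp : pvSplitPipe rest with
        | nil => exact absurd hsp (pvSplitPipe_ne_nil rest)
        | cons p ps => simp [pvConsHead, pvSplitPipe, hc, hsp]

theorem pvSplitOn_eq (l : List Char) : PySem.Chars.splitOn l ['|'] = pvSplitPipe l := by
  rw [PySem.Chars.splitOn, pvSplitOn_go_eq l (l.length + 1) [] [] (by omega)]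
  cases hsp : pvSplitPipe l with
  | nil => exact absurd hsp (pvSplitPipe_ne_nil l)
  | cons p ps => simp [pvConsHead]

theorem pvCount_go_eq (c : Char) (l : List Char) : ∀ (fuel : Nat) (acc : Nat),
    l.length ≤ fuel → PySem.Chars.count.go [c] fuel l acc = acc + l.count c := by
  induction l with
  | nil =>
    intro fuel acc h
    cases fuel with
    | zero => simp [PySem.Chars.count.go]
    | succ f => simp [PySem.Chars.count.go]
  | cons c' t ih =>
    intro fuel acc h
    cases fuel with
    | zero => simp at h
    | succ f =>
      by_cases hc : c = c'
      · have hpre : List.isPrefixOf [c] (c' :: t) = true := by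
          simp [List.isPrefixOf, hc]
        rw [PySem.Chars.count.go, if_pos hpre]
        simp only [List.length_cons, List.length_nil, List.drop_succ_cons, List.drop_zero]
        rw [ih f (acc + 1) (by simp at h ⊢; omega)]
        simp [hc]
        omega
      · have hpre' : ¬ List.isPrefixOf [c] (c' :: t) = true := by
          simp [List.isPrefixOf]
          exact hc
        rw [PySem.Chars.count.go, if_neg hpre']
        rw [ih f acc (by simp at h ⊢; omega)]
        simp [List.count_cons]
        exact fun h' => hc (by simp [h'])

theorem pvCount_eq (c : Char) (l : List Char) : PySem.Chars.count l [c] = l.count c := by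
  rw [PySem.Chars.count, if_neg (by simp)]
  rw [pvCount_go_eq c l l.length 0 (le_refl _)]
  omega

theorem pvSplitPipe_no_pipe (l : List Char) : ∀ p ∈ pvSplitPipe l, '|' ∉ p := by
  induction l with
  | nil =>
    intro p hp
    simp [pvSplitPipe] at hp
    simp [hp]
  | cons c rest ih =>
    intro p hp
    by_cases hc : c = '|'
    · simp [pvSplitPipe, hc] at hp
      rcases hp with h | h
      · simp [h]
      · exact ih p h
    · cases hsp : pvSplitPipe rest with
      | nil => exact absurd hsp (pvSplitPipe_ne_nil rest)
      | cons q qs =>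
        simp [pvSplitPipe, hc, hsp] at hp
        rcases hp with h | h
        · subst h
          intro hmem
          rcases List.mem_cons.mp hmem with h1 | h1
          · exact hc h1.symm
          · exact ih q (by rw [hsp]; exact List.mem_cons_self) h1
        · exact ih p (by rw [hsp]; exact List.mem_cons_of_mem _ h)

theorem pvJoinP_splitPipe (l : List Char) : pvJoinP (pvSplitPipe l) = l := by
  induction l with
  | nil => simp [pvSplitPipe, pvJoinP]
  | cons c rest ih =>
    by_cases hc : c = '|'
    · cases hsp : pvSplitPipe rest with
      | nil => exact absurd hsp (pvSplitPipe_ne_nil rest)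
      | cons q qs =>
        rw [hsp] at ih
        simp [pvSplitPipe, hc, hsp, pvJoinP] at ih ⊢
        simpa [pvJoinP] using ih
    · cases hsp : pvSplitPipe rest with
      | nil => exact absurd hsp (pvSplitPipe_ne_nil rest)
      | cons q qs =>
        rw [hsp] at ih
        simp [pvSplitPipe, hc, hsp, pvJoinP] at ih ⊢
        simpa [pvJoinP] using ih

theorem pvScanChunk (p : List Char) (hp : '|' ∉ p) :
    ∀ (parts : List (List Char)) (cur : List Char) (bc : Int),
    p.foldl pvAStep (parts, cur, bc) = (parts, cur ++ p, bc + pvBal p) := by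
  induction p with
  | nil =>
    intro parts cur bc
    simp [pvBal]
  | cons c t ih =>
    intro parts cur bc
    have hc : c ≠ '|' := fun h => hp (by simp [h])
    have ht : '|' ∉ t := fun h => hp (List.mem_cons_of_mem _ h)
    by_cases h1 : c = '{'
    · simp only [List.foldl_cons, pvAStep, if_pos h1]
      rw [ih ht]
      simp [pvBal, h1, List.append_assoc, Prod.ext_iff]
      omega
    · by_cases h2 : c = '}'
      · simp only [List.foldl_cons, pvAStep, if_neg h1, if_pos h2]
        rw [ih ht]
        simp [pvBal, h2, List.append_assoc, Prod.ext_iff]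
        omega
      · have h3 : ¬(c = '|' ∧ bc = 0) := fun h => hc h.1
        simp only [List.foldl_cons, pvAStep, if_neg h1, if_neg h2, if_neg h3]
        rw [ih ht]
        simp [pvBal, h1, h2, List.append_assoc]

theorem pvMParts_append (ps : List (List Char)) :
    ∀ (parts : List (List Char)) (buf : List Char),
    ps.foldl pvMStep (parts, buf) =
      (parts ++ (ps.foldl pvMStep ([], buf)).1, (ps.foldl pvMStep ([], buf)).2) := by
  induction ps with
  | nil => intro parts buf; simp
  | cons p t ih =>
    intro parts buf
    by_cases hb : buf.count '{' = buf.count '}'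
    · simp only [List.foldl_cons, pvMStep, if_pos hb, List.nil_append]
      rw [ih (parts ++ [buf]) p, ih [buf] p]
      simp
    · simp only [List.foldl_cons, pvMStep, if_neg hb]
      exact ih parts _

theorem pvMainScan (rest : List (List Char)) (h : ∀ p ∈ rest, '|' ∉ p) :
    ∀ (parts : List (List Char)) (buf : List Char),
    ((rest.map (fun q => '|' :: q)).flatten).foldl pvAStep (parts, buf, pvBal buf) =
      ((rest.foldl pvMStep (parts, buf)).1, (rest.foldl pvMStep (parts, buf)).2,
        pvBal (rest.foldl pvMStep (parts, buf)).2) := by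
  induction rest with
  | nil =>
    intro parts buf
    simp
  | cons p t ih =>
    intro parts buf
    have hp : '|' ∉ p := h p List.mem_cons_self
    have ht : ∀ q ∈ t, '|' ∉ q := fun q hq => h q (List.mem_cons_of_mem _ hq)
    simp only [List.map_cons, List.flatten_cons, List.cons_append, List.foldl_cons,
      List.foldl_append]
    by_cases hb : pvBal buf = 0
    · have hb' : buf.count '{' = buf.count '}' := by
        simp [pvBal] at hb; omega
      have hstep : pvAStep (parts, buf, pvBal buf) '|' = (parts ++ [buf], [], (0 : Int)) := by
        simp [pvAStep, hb]
      rw [hstep]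
      have hchunk := pvScanChunk p hp (parts ++ [buf]) [] 0
      simp only [List.nil_append] at hchunk
      have h0 : (0 : Int) + pvBal p = pvBal p := by omega
      rw [h0] at hchunk
      rw [hchunk, ih ht (parts ++ [buf]) p]
      simp [pvMStep, hb']
    · have hb' : ¬ buf.count '{' = buf.count '}' := by
        simp [pvBal] at hb; omega
      have hstep : pvAStep (parts, buf, pvBal buf) '|' = (parts, buf ++ ['|'], pvBal buf) := by
        have : ¬('|' = '{') := by decide
        have h2 : ¬('|' = '}') := by decide
        simp [pvAStep, hb]
      rw [hstep]
      have hbal : pvBal buf + pvBal p = pvBal (buf ++ '|' :: p) := by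
        simp [pvBal, List.count_append]
        omega
      have hchunk := pvScanChunk p hp parts (buf ++ ['|']) (pvBal buf)
      have hbuf : buf ++ ['|'] ++ p = buf ++ '|' :: p := by simp
      rw [hchunk, hbuf, hbal]
      rw [ih ht parts (buf ++ '|' :: p)]
      simp [pvMStep, hb']

theorem pvBFold_eq (pieces : List (List Char)) :
    ∀ (d : PySem.Dict String String) (i : Int) (buf : List Char),
    pieces.foldl pvBStep (d, i, buf) =
      (((pieces.foldl pvMStep ([], buf)).1.foldl pvCommit (d, i)).1,
       ((pieces.foldl pvMStep ([], buf)).1.foldl pvCommit (d, i)).2,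
       (pieces.foldl pvMStep ([], buf)).2) := by
  induction pieces with
  | nil => intro d i buf; simp
  | cons p t ih =>
    intro d i buf
    by_cases hb : buf.count '{' = buf.count '}'
    · have hcnt : PySem.Chars.count buf ['{'] = PySem.Chars.count buf ['}'] := by
        rw [pvCount_eq, pvCount_eq]; exact hb
      simp only [List.foldl_cons, pvBStep, if_pos hcnt, pvMStep, if_pos hb, List.nil_append]
      rw [ih (pvCommit (d, i) buf).1 (pvCommit (d, i) buf).2 p]
      rw [pvMParts_append t [buf] p]
      simp
    · have hcnt : ¬ PySem.Chars.count buf ['{'] = PySem.Chars.count buf ['}'] := by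
        rw [pvCount_eq, pvCount_eq]; exact hb
      simp only [List.foldl_cons, pvBStep, if_neg hcnt, pvMStep, if_neg hb]
      exact ih d i _

-- ===== VERDICT (by name: the statement is the Claim_ definition above) =====
theorem parse_template_params_spec : Claim_equal_parse_template_params := by
  intro s _
  unfold Spec_parse_template_params
  by_cases hempty : s.toList = []
  · simp [parse_template_params, parse_template_params_alt, hempty, pvSplitOn_eq,
      pvSplitPipe, PySem.Dict.empty, List.headI]
  · obtain ⟨b0, rest, hsp⟩ : ∃ b0 rest, pvSplitPipe s.toList = b0 :: rest := by
      cases hsp : pvSplitPipe s.toList with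
      | nil => exact absurd hsp (pvSplitPipe_ne_nil _)
      | cons b0 rest => exact ⟨b0, rest, rfl⟩
    have hb0 : '|' ∉ b0 := pvSplitPipe_no_pipe s.toList b0 (by rw [hsp]; exact List.mem_cons_self)
    have hrest : ∀ p ∈ rest, '|' ∉ p := fun p hp =>
      pvSplitPipe_no_pipe s.toList p (by rw [hsp]; exact List.mem_cons_of_mem _ hp)
    have hjoin : s.toList = b0 ++ (rest.map (fun q => '|' :: q)).flatten := by
      have := pvJoinP_splitPipe s.toList
      rw [hsp] at this
      simpa [pvJoinP] using this.symm
    -- evaluate A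
    have hA : parse_template_params s =
        ((if (rest.foldl pvMStep ([], b0)).2 ≠ [] then
            (rest.foldl pvMStep ([], b0)).1 ++ [(rest.foldl pvMStep ([], b0)).2]
          else (rest.foldl pvMStep ([], b0)).1).foldl pvCommit
            ((PySem.Dict.empty : PySem.Dict String String), (1 : Int))).1.items := by
      rw [parse_template_params]
      rw [if_neg (by simp [hempty])]
      have hscan : s.toList.foldl pvAStep ([], [], (0 : Int)) =
          ((rest.foldl pvMStep ([], b0)).1, (rest.foldl pvMStep ([], b0)).2,
            pvBal (rest.foldl pvMStep ([], b0)).2) := by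
        rw [hjoin, List.foldl_append]
        have hchunk := pvScanChunk b0 hb0 [] [] 0
        have h0 : (0 : Int) + pvBal b0 = pvBal b0 := by omega
        rw [h0, List.nil_append] at hchunk
        rw [hchunk]
        exact pvMainScan rest hrest [] b0
      rw [hscan]
    -- evaluate B
    have hB : parse_template_params_alt s =
        (if (rest.foldl pvMStep ([], b0)).2 ≠ [] then
          (pvCommit ((rest.foldl pvMStep ([], b0)).1.foldl pvCommit
              ((PySem.Dict.empty : PySem.Dict String String), (1 : Int)))
            (rest.foldl pvMStep ([], b0)).2).1.items
         else ((rest.foldl pvMStep ([], b0)).1.foldl pvCommit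
              ((PySem.Dict.empty : PySem.Dict String String), (1 : Int))).1.items) := by
      simp only [parse_template_params_alt, pvSplitOn_eq, hsp, List.headI, List.tail_cons]
      rw [pvBFold_eq rest PySem.Dict.empty 1 b0]
    rw [hA, hB]
    by_cases hbuf : (rest.foldl pvMStep ([], b0)).2 = []
    · simp [hbuf]
    · rw [if_pos hbuf, if_pos hbuf, List.foldl_append]
      simp
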